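-- pv_equiv track=rewrite | github.com/rosygit-creator/Python_practice | string_programs/ethopian_tree.py | count_1_substring
-- ===== SOURCE A (Python) =====
-- def count_1_substring(count):
--     i=0
--     ht=1
--
--     while i<count:
--         if i%2==0:
--             ht=ht*2
--         else:
--             ht+=1
--         i+=1
--
--     return ht
-- ===== SOURCE B (Python) =====
-- def count_1_substring(count):
--     # Closed form: the loop maps ht -> 2*ht then ht -> ht+1 alternately,
--     # i.e. each pair of steps sends ht to 2*ht+1; starting from 1,
--     # k full pairs give 2**(k+1)-1, one extra doubling gives 2**(k+2)-2.
--     if count <= 0: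
--         return 1
--     k, r = divmod(count, 2)
--     return (1 << (k + 2)) - 2 if r else (1 << (k + 1)) - 1
-- ===== Notes on version B (the rewrite author's own statement) =====
-- stated objective: faster
-- what changed: Replaced the step-by-step loop (double on even steps, increment on odd steps) by a closed-form power computed with a single shift; intended as faster (a timing run measured large ratios, e.g. 735x at n=65536, though the largest size could not be compared because the result no longer decoded).
import Mathlib
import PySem

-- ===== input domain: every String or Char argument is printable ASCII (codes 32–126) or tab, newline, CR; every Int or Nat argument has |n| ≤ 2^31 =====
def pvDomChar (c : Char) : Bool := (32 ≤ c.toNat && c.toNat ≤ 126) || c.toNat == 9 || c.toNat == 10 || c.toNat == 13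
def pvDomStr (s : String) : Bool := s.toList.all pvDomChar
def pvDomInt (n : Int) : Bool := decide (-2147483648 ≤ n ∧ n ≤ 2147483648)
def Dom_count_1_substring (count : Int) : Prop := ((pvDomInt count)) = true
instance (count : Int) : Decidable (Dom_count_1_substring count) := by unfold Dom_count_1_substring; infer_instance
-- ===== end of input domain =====

-- B replaces A's step-by-step loop by a closed-form power; intended as faster (a timing run measured 735x at n=65536).

-- ===== PORT A =====
-- the while loop: state (i, ht); fuel = number of remaining iterations (count - i)
def count1Loop (count : Int) (i ht : Int) : Nat → Int
  | 0 => ht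
  | fuel + 1 =>
    if i < count then
      count1Loop count (i + 1) (if PySem.Int.mod i 2 = 0 then ht * 2 else ht + 1) fuel
    else ht

def count_1_substring (count : Int) : Int :=
  count1Loop count 0 1 count.toNat

-- ===== PORT B =====
def count_1_substring_alt (count : Int) : Int :=
  if count ≤ 0 then 1
  else
    let k := PySem.Int.floordiv count 2
    let r := PySem.Int.mod count 2
    if r ≠ 0 then 2 ^ (k + 2).toNat - 2 else 2 ^ (k + 1).toNat - 1

-- ===== PRECONDITION & SPEC =====
def Spec_count_1_substring (count : Int) (out : Int) : Prop := out = count_1_substring_alt count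
instance (count : Int) (out : Int) : Decidable (Spec_count_1_substring count out) := by unfold Spec_count_1_substring; infer_instance

-- ===== CLAIM (what is proved, stated in full; the proofs are below) =====
def Claim_equal_count_1_substring : Prop := ∀ (count : Int), Dom_count_1_substring count → Spec_count_1_substring count (count_1_substring count)

-- ===== LEMMAS AND PROOFS =====

-- value of the loop when started at an even index i with fuel n = count - i
theorem count1Loop_closed (n : Nat) (i ht : Int) (hi : 0 ≤ i) (he : i % 2 = 0) :
    count1Loop (i + n) i ht n =
      if n % 2 = 0 then 2 ^ (n / 2) * (ht + 1) - 1 else 2 ^ (n / 2 + 1) * (ht + 1) - 2 := by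
  induction n using Nat.strong_induction_on generalizing i ht with
  | _ n ih =>
    match n with
    | 0 => simp [count1Loop]
    | 1 =>
      simp only [count1Loop]
      have h1 : i < i + (1 : Nat) := by omega
      have hm : PySem.Int.mod i 2 = 0 := by
        simpa [PySem.Int.mod_eq_emod_of_pos (a := i) (b := 2) (by norm_num)] using he
      have hd : (2 : Int) ∣ i := by omega
      simp [hd]
      ring
    | m + 2 =>
      have h1 : i < i + ((m + 2 : Nat) : Int) := by push_cast; omega
      have h2 : i + 1 < i + ((m + 2 : Nat) : Int) := by push_cast; omega
      have hm : PySem.Int.mod i 2 = 0 := by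
        simpa [PySem.Int.mod_eq_emod_of_pos (a := i) (b := 2) (by norm_num)] using he
      have hm1 : PySem.Int.mod (i + 1) 2 ≠ 0 := by
        rw [PySem.Int.mod_eq_emod_of_pos (a := i + 1) (b := 2) (by norm_num)]
        omega
      have step : count1Loop (i + ((m + 2 : Nat) : Int)) i ht (m + 2)
          = count1Loop (i + ((m + 2 : Nat) : Int)) (i + 2) (ht * 2 + 1) m := by
        have he2 : i + 1 + 1 = i + 2 := by ring
        simp only [count1Loop, h1, if_pos, hm, h2, hm1]
        simp [he2]
      have heq : i + ((m + 2 : Nat) : Int) = (i + 2) + (m : Nat) := by push_cast; ring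
      rw [step, heq, ih m (by omega) (i + 2) (ht * 2 + 1) (by omega) (by omega)]
      have hpar : (m + 2) % 2 = m % 2 := by omega
      have hdiv : (m + 2) / 2 = m / 2 + 1 := by omega
      rw [hpar, hdiv]
      by_cases hp : m % 2 = 0 <;> simp [hp] <;> ring

-- ===== VERDICT (by name: the statement is the Claim_ definition above) =====
theorem count_1_substring_spec : Claim_equal_count_1_substring := by
  intro count _
  unfold Spec_count_1_substring count_1_substring count_1_substring_alt
  by_cases hle : count ≤ 0
  · have : count.toNat = 0 := by omega
    simp [this, count1Loop, hle]
  · have hle' : (0:Int) ≤ count := by omega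
    lift count to ℕ using hle' with n
    have hn0 : 0 < n := by exact_mod_cast not_le.mp hle
    have htn : ((n : Int)).toNat = n := by omega
    have hc0 : ((n : Int)) = 0 + (n : Int) := by ring
    rw [htn, hc0, count1Loop_closed n 0 1 le_rfl (by norm_num)]
    have h2 : (0 : Int) < 2 := by norm_num
    have hfd : PySem.Int.floordiv (0 + (n : Int)) 2 = ((n / 2 : Nat) : Int) := by
      simpa using PySem.Int.floordiv_natCast n 2
    have hmd : PySem.Int.mod (0 + (n : Int)) 2 = ((n % 2 : Nat) : Int) := by
      simpa using PySem.Int.mod_natCast n 2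
    simp only [hfd, hmd]
    have hnle : ¬ (0 + (n : Int) ≤ 0) := by omega
    have hne : ¬ n = 0 := by omega
    by_cases hp : n % 2 = 0
    · simp [hp]
      have hcast : ((n : Int) / 2 + 1).toNat = n / 2 + 1 := by omega
      rw [hcast, if_neg hne]
      ring
    · have hp1 : n % 2 = 1 := by omega
      simp [hp1]
      have hcast : ((n : Int) / 2 + 2).toNat = n / 2 + 2 := by omega
      rw [hcast, if_neg hne]
      ring
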